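-- pv_equiv track=rewrite | github.com/jadirred/yandex100 | coin pick winner.py | coin_pick_winner_turns
-- ===== SOURCE A (Python) =====
-- def coin_pick_winner_turns(prev, n, turns, games):
--     #to check that n is positive is crucial in order to avoid
--     #endless recursion
--     if n>0:
--         #the basis state: when n=1 or 2 or 3 from the very beginning
--         #of the last winning step
--         if n==1 or n==2 or n==4:
--            games.append([prev, n, turns])
--            #if we put small n's =1,2,4 we still want to check another
--            #winning combinations
--            if (turns == 1):
--                coin_pick_winner_turns(n, n-1, turns+1, games)
--                coin_pick_winner_turns(n, n-2, turns+1, games)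
--                coin_pick_winner_turns(n, n-4, turns+1, games)
--         else:
--             #pay attention this is the recursive step
--             #we check all three options (1,2,3) ans we always count turns
--             coin_pick_winner_turns(n, n-1, turns+1, games)
--             coin_pick_winner_turns(n, n-2, turns+1, games)
--             coin_pick_winner_turns(n, n-4, turns+1, games)
--     #we return the list of lists in order to work with it in the major function
--     return(games)
-- ===== SOURCE B (Python) =====
-- def coin_pick_winner_turns(prev, n, turns, games):
--     # explicit-stack DFS instead of recursion; same append order (mutates games like A)
--     stack = [(prev, n, turns)]
--     while stack:
--         p, m, t = stack.pop()
--         if m > 0: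
--             if m == 1 or m == 2 or m == 4:
--                 games.append([p, m, t])
--                 if t == 1:
--                     stack.append((m, m - 4, t + 1))
--                     stack.append((m, m - 2, t + 1))
--                     stack.append((m, m - 1, t + 1))
--             else:
--                 stack.append((m, m - 4, t + 1))
--                 stack.append((m, m - 2, t + 1))
--                 stack.append((m, m - 1, t + 1))
--     return games
-- ===== Notes on version B (the rewrite author's own statement) =====
-- stated objective: alternative
-- what changed: Replaced the self-recursive DFS by an explicit stack-based loop that pushes the three child frames in reverse order and pops them to reproduce the same pre-order append sequence; Pre_ excludes n > 900, where A's recursion depth (about n) overflows CPython's default recursion limit and A raises RecursionError.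
import Mathlib
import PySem

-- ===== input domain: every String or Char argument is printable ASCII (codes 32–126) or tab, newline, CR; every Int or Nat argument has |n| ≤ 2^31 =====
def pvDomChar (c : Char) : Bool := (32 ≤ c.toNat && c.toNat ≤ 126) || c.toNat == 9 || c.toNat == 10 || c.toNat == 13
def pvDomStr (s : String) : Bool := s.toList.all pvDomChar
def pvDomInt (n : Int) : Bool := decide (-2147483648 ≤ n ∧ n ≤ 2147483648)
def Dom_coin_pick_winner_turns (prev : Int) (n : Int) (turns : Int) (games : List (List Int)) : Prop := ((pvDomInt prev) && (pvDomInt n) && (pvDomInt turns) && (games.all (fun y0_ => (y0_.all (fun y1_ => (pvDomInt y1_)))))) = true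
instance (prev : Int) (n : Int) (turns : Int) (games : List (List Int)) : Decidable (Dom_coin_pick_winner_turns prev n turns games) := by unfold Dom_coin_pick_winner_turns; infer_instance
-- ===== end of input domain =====

-- B replaces A's self-recursion by an explicit stack-based DFS loop (same results, same
-- append order; both A and B mutate `games` in Python — equivalence here is on the return value).


-- ===== PORT A =====
-- literal transliteration of A's recursion; the Nat fuel is only a totality guard:
-- started at n.toNat it can never reach 0 while n > 0, since n strictly decreases while positive
def pvRunA : Nat → Int → Int → Int → List (List Int) → List (List Int)
  | 0, _, _, _, games => games
  | fuel+1, prev, n, turns, games =>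
    if n > 0 then
      if n == 1 || n == 2 || n == 4 then
        let games := games ++ [[prev, n, turns]]
        if turns == 1 then
          let g1 := pvRunA fuel n (n-1) (turns+1) games
          let g2 := pvRunA fuel n (n-2) (turns+1) g1
          pvRunA fuel n (n-4) (turns+1) g2
        else games
      else
        let g1 := pvRunA fuel n (n-1) (turns+1) games
        let g2 := pvRunA fuel n (n-2) (turns+1) g1
        pvRunA fuel n (n-4) (turns+1) g2
    else games

def coin_pick_winner_turns (prev : Int) (n : Int) (turns : Int) (games : List (List Int)) : List (List Int) :=
  pvRunA n.toNat prev n turns games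

-- ===== PORT B =====
-- B's loop: the stack's head is its top (Python's list end); children are pushed subtract-4
-- first so the subtract-1 child pops first.  The Nat fuel is only a totality guard: started at
-- Σ 4^(n.toNat) over the stack it can never reach 0 while the stack is non-empty.
def pvStackMeasure (stack : List (Int × Int × Int)) : Nat :=
  (stack.map (fun f => 4 ^ f.2.1.toNat)).sum

def pvStackRunF : Nat → List (Int × Int × Int) → List (List Int) → List (List Int)
  | 0, _, games => games
  | fuel+1, stack, games =>
    match stack with
    | [] => games
    | (p, m, t) :: rest =>
      if m > 0 then
        if m == 1 || m == 2 || m == 4 then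
          let games := games ++ [[p, m, t]]
          if t == 1 then
            pvStackRunF fuel ((m, m-1, t+1) :: (m, m-2, t+1) :: (m, m-4, t+1) :: rest) games
          else pvStackRunF fuel rest games
        else
          pvStackRunF fuel ((m, m-1, t+1) :: (m, m-2, t+1) :: (m, m-4, t+1) :: rest) games
      else pvStackRunF fuel rest games

def coin_pick_winner_turns_alt (prev : Int) (n : Int) (turns : Int) (games : List (List Int)) : List (List Int) :=
  pvStackRunF (pvStackMeasure [(prev, n, turns)]) [(prev, n, turns)] games

-- ===== PRECONDITION & SPEC =====
-- Pre_ excludes large n: A's recursion immediately descends a chain of depth about n, so for n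
-- beyond CPython's default recursion limit (~1000 frames) Python A raises RecursionError; n ≤ 900
-- leaves a safety margin for the caller's own stack frames.
def Pre_coin_pick_winner_turns (prev : Int) (n : Int) (turns : Int) (games : List (List Int)) : Prop := n ≤ 900
instance (prev : Int) (n : Int) (turns : Int) (games : List (List Int)) : Decidable (Pre_coin_pick_winner_turns prev n turns games) := by unfold Pre_coin_pick_winner_turns; infer_instance
def pvWitness_coin_pick_winner_turns : Int × Int × Int × List (List Int) := (0, 4, 1, [])

def Spec_coin_pick_winner_turns (prev : Int) (n : Int) (turns : Int) (games : List (List Int)) (out : List (List Int)) : Prop := out = coin_pick_winner_turns_alt prev n turns games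
instance (prev : Int) (n : Int) (turns : Int) (games : List (List Int)) (out : List (List Int)) : Decidable (Spec_coin_pick_winner_turns prev n turns games out) := by unfold Spec_coin_pick_winner_turns; infer_instance

-- ===== CLAIM (what is proved, stated in full; the proofs are below) =====
def Claim_equal_coin_pick_winner_turns : Prop := ∀ (prev : Int) (n : Int) (turns : Int) (games : List (List Int)), Dom_coin_pick_winner_turns prev n turns games → Pre_coin_pick_winner_turns prev n turns games → Spec_coin_pick_winner_turns prev n turns games (coin_pick_winner_turns prev n turns games)

-- ===== LEMMAS AND PROOFS =====
-- proof-side reference versions without fuel (well-founded recursion), used only below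
def pvA (prev : Int) (n : Int) (turns : Int) (games : List (List Int)) : List (List Int) :=
  if hn : n > 0 then
    if n == 1 || n == 2 || n == 4 then
      let games := games ++ [[prev, n, turns]]
      if turns == 1 then
        pvA n (n-4) (turns+1) (pvA n (n-2) (turns+1) (pvA n (n-1) (turns+1) games))
      else games
    else
      pvA n (n-4) (turns+1) (pvA n (n-2) (turns+1) (pvA n (n-1) (turns+1) games))
  else games
termination_by n.toNat
decreasing_by all_goals omega

-- fuel irrelevance for A's port: any fuel ≥ n.toNat computes pvA
theorem pvRunA_eq (fuel : Nat) :
    ∀ (p n t : Int) (g : List (List Int)), n.toNat ≤ fuel → pvRunA fuel p n t g = pvA p n t g := by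
  induction fuel with
  | zero =>
    intro p n t g hk
    have hn : ¬ n > 0 := by omega
    rw [pvRunA, pvA]; simp [hn]
  | succ fuel ih =>
    intro p n t g hk
    by_cases hn : n > 0
    · have h1 : (n-1).toNat ≤ fuel := by omega
      have h2 : (n-2).toNat ≤ fuel := by omega
      have h4 : (n-4).toNat ≤ fuel := by omega
      rw [pvRunA, pvA]
      simp only [hn, if_true, dite_true]
      by_cases hb : (n == 1 || n == 2 || n == 4) = true
      · simp only [hb, if_true]
        by_cases ht : (t == 1) = true
        · simp only [ht, if_true, ih _ _ _ _ h1, ih _ _ _ _ h2, ih _ _ _ _ h4]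
        · simp only [ht]; simp
      · simp only [hb, Bool.false_eq_true, if_false, ih _ _ _ _ h1, ih _ _ _ _ h2, ih _ _ _ _ h4]
    · rw [pvRunA, pvA]; simp [hn]

-- proof-side stack run without fuel (well-founded recursion on Σ 4^(n.toNat))
def pvS (stack : List (Int × Int × Int)) (games : List (List Int)) : List (List Int) :=
  match stack with
  | [] => games
  | (p, m, t) :: rest =>
    if hm : m > 0 then
      if m == 1 || m == 2 || m == 4 then
        let games := games ++ [[p, m, t]]
        if t == 1 then
          pvS ((m, m-1, t+1) :: (m, m-2, t+1) :: (m, m-4, t+1) :: rest) games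
        else pvS rest games
      else
        pvS ((m, m-1, t+1) :: (m, m-2, t+1) :: (m, m-4, t+1) :: rest) games
    else pvS rest games
termination_by pvStackMeasure stack
decreasing_by
  all_goals simp [pvStackMeasure]
  all_goals try
    · have h1 : 1 ≤ m.toNat := by omega
      have e1 : (m-1).toNat ≤ m.toNat - 1 := by omega
      have e2 : (m-2).toNat ≤ m.toNat - 1 := by omega
      have e4 : (m-4).toNat ≤ m.toNat - 1 := by omega
      have hb : (4:Nat) ^ (m.toNat - 1) + 4 ^ (m.toNat - 1) + 4 ^ (m.toNat - 1) < 4 ^ m.toNat := by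
        have : (4:Nat) ^ m.toNat = 4 ^ (m.toNat - 1) * 4 := by
          rw [← pow_succ]; congr 1; omega
        have hp : (1:Nat) ≤ 4 ^ (m.toNat - 1) := Nat.one_le_pow _ _ (by norm_num)
        omega
      have _m1 := Nat.pow_le_pow_right (by norm_num : 1 ≤ 4) e1
      have _m2 := Nat.pow_le_pow_right (by norm_num : 1 ≤ 4) e2
      have _m4 := Nat.pow_le_pow_right (by norm_num : 1 ≤ 4) e4
      omega

-- the measure strictly drops when a frame with m > 0 is expanded
theorem pvMeasure_children (m : Int) (t : Int) (rest : List (Int × Int × Int)) (hm : m > 0) :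
    pvStackMeasure ((m, m-1, t+1) :: (m, m-2, t+1) :: (m, m-4, t+1) :: rest) < pvStackMeasure ((0, m, 0) :: rest) := by
  simp [pvStackMeasure]
  have h1 : 1 ≤ m.toNat := by omega
  have e1 : (m-1).toNat ≤ m.toNat - 1 := by omega
  have e2 : (m-2).toNat ≤ m.toNat - 1 := by omega
  have e4 : (m-4).toNat ≤ m.toNat - 1 := by omega
  have hb : (4:Nat) ^ (m.toNat - 1) + 4 ^ (m.toNat - 1) + 4 ^ (m.toNat - 1) < 4 ^ m.toNat := by
    have : (4:Nat) ^ m.toNat = 4 ^ (m.toNat - 1) * 4 := by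
      rw [← pow_succ]; congr 1; omega
    have hp : (1:Nat) ≤ 4 ^ (m.toNat - 1) := Nat.one_le_pow _ _ (by norm_num)
    omega
  have m2 := Nat.pow_le_pow_right (by norm_num : 1 ≤ 4) e2
  have m4 := Nat.pow_le_pow_right (by norm_num : 1 ≤ 4) e4
  have m1 := Nat.pow_le_pow_right (by norm_num : 1 ≤ 4) e1
  omega

-- fuel irrelevance for B's port: any fuel ≥ the stack measure computes pvS
theorem pvStackRunF_eq (fuel : Nat) :
    ∀ (stack : List (Int × Int × Int)) (g : List (List Int)), pvStackMeasure stack ≤ fuel →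
      pvStackRunF fuel stack g = pvS stack g := by
  induction fuel with
  | zero =>
    intro stack g hk
    match stack with
    | [] => rw [pvStackRunF, pvS]
    | (p, m, t) :: rest =>
      exfalso
      have h1 : (1:Nat) ≤ 4 ^ m.toNat := Nat.one_le_pow _ _ (by norm_num)
      simp only [pvStackMeasure, List.map, List.sum_cons] at hk
      omega
  | succ fuel ih =>
    intro stack g hk
    match stack with
    | [] => rw [pvStackRunF, pvS]
    | (p, m, t) :: rest =>
      rw [pvStackRunF, pvS]
      by_cases hm : m > 0
      · have hdrop := pvMeasure_children m t rest hm
        have hrest : pvStackMeasure rest ≤ fuel := by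
          have : (1:Nat) ≤ 4 ^ m.toNat := Nat.one_le_pow _ _ (by norm_num)
          simp [pvStackMeasure] at hk ⊢
          omega
        have hch : pvStackMeasure ((m, m-1, t+1) :: (m, m-2, t+1) :: (m, m-4, t+1) :: rest) ≤ fuel := by
          simp [pvStackMeasure] at hk hdrop ⊢
          omega
        simp only [hm, if_true, dite_true]
        by_cases hb : (m == 1 || m == 2 || m == 4) = true
        · simp only [hb, if_true]
          by_cases ht : (t == 1) = true
          · simp only [ht, if_true, ih _ _ hch]
          · simp only [ht, Bool.false_eq_true, if_false, ih _ _ hrest]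
        · simp only [hb, Bool.false_eq_true, if_false, ih _ _ hch]
      · simp only [hm, if_false, dite_false]
        have hrest : pvStackMeasure rest ≤ fuel := by
          have : (1:Nat) ≤ 4 ^ m.toNat := Nat.one_le_pow _ _ (by norm_num)
          simp [pvStackMeasure] at hk ⊢
          omega
        exact ih _ _ hrest

-- key invariant: popping one frame of pvS's stack performs exactly one call of pvA
theorem pvS_cons (k : Nat) :
    ∀ (p m t : Int) (rest : List (Int × Int × Int)) (games : List (List Int)),
      m.toNat ≤ k →
      pvS ((p, m, t) :: rest) games = pvS rest (pvA p m t games) := by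
  induction k with
  | zero =>
    intro p m t rest games hk
    have hm : ¬ m > 0 := by omega
    rw [pvS, pvA]
    simp [hm]
  | succ k ih =>
    intro p m t rest games hk
    by_cases hm : m > 0
    · have h1 : (m-1).toNat ≤ k := by omega
      have h2 : (m-2).toNat ≤ k := by omega
      have h4 : (m-4).toNat ≤ k := by omega
      rw [pvS, pvA]
      simp only [hm, dite_true]
      by_cases hb : (m == 1 || m == 2 || m == 4) = true
      · simp only [hb, if_true]
        by_cases ht : (t == 1) = true
        · simp only [ht, if_true]
          rw [ih m (m-1) (t+1) _ _ h1, ih m (m-2) (t+1) _ _ h2, ih m (m-4) (t+1) _ _ h4]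
        · simp only [ht]
          simp
      · simp only [hb, Bool.false_eq_true, if_false]
        rw [ih m (m-1) (t+1) _ _ h1, ih m (m-2) (t+1) _ _ h2, ih m (m-4) (t+1) _ _ h4]
    · rw [pvS, pvA]
      simp [hm]

-- ===== VERDICT (by name: the statement is the Claim_ definition above) =====
theorem coin_pick_winner_turns_spec : Claim_equal_coin_pick_winner_turns := by
  intro prev n turns games _ _
  unfold Spec_coin_pick_winner_turns coin_pick_winner_turns coin_pick_winner_turns_alt
  rw [pvRunA_eq n.toNat prev n turns games (le_refl _),
      pvStackRunF_eq _ _ _ (le_refl _),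
      pvS_cons n.toNat prev n turns [] games (le_refl _), pvS]
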